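-- pv_equiv track=rewrite | github.com/DiamondLightSource/fa-archiver-py3 | python/fa_archiver/falib/falib.py | format_mask
-- ===== SOURCE A (Python) =====
-- def format_mask(mask):
--     '''Returns number of bits set in mask and a mask request suitable for
--     sending to the server.  The parameter mask should be a list of FA ids.'''
--
--     # Normalise the mask by removing duplicates and sorting into order.
--     mask = sorted(list(set(mask)))
--     count = len(mask)
--
--     # Format mask pattern
--     ranges = []
--     first = mask[0]
--     last = mask[0]
--     for id in mask[1:] + [None]:
--         if id != last + 1:
--             # New id breaks range, complete the range and write it out.
--             if last == first:
--                 ranges.append('%d' % last)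
--             else:
--                 ranges.append('%d-%d' % (first, last))
--             first = id
--         last = id
--
--     return count, ','.join(ranges)
-- ===== SOURCE B (Python) =====
-- def format_mask(mask):
--     '''Returns number of bits set in mask and a mask request suitable for
--     sending to the server.  The parameter mask should be a list of FA ids.'''
--     ids = set(mask)
--     m = sorted(ids)
--     # An id opens a run iff its predecessor is absent, closes one iff its
--     # successor is absent; pairing the k-th opener with the k-th closer
--     # yields the runs in order, with no sequential merging pass.
--     starts = [x for x in m if x - 1 not in ids]
--     ends = [x for x in m if x + 1 not in ids]
--     parts = ['%d' % f if f == l else '%d-%d' % (f, l)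
--              for f, l in zip(starts, ends)]
--     return len(m), ','.join(parts)
-- ===== Notes on version B (the rewrite author's own statement) =====
-- stated objective: alternative
-- what changed: B never merges consecutive ids in a sequential pass: it identifies run boundaries by set membership (x is a run start iff x-1 is not in the set, a run end iff x+1 is not), zips the k-th start with the k-th end, and formats the pairs, instead of A's forward loop with first/last accumulators and a None sentinel.
import Mathlib
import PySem

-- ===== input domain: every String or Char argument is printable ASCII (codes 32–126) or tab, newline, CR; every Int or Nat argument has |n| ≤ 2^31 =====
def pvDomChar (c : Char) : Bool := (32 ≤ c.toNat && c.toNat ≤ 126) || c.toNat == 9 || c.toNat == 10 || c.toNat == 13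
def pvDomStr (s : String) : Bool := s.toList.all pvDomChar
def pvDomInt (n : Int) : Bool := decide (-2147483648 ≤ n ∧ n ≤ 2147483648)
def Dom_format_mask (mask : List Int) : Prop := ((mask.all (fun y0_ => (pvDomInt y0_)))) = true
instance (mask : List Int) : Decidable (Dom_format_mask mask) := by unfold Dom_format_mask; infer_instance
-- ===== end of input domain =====

-- B finds run boundaries by set membership (x starts a run iff x-1 is absent, ends one
-- iff x+1 is absent) and zips the k-th start with the k-th end, instead of A's forward
-- loop with first/last accumulators and a None sentinel (objective: alternative).


-- ===== PORT A =====
-- the loop body of A: state (ranges, first, last); first/last become none only when the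
-- trailing None sentinel is consumed, exactly as in the Python
def pvStepA (st : List String × Option Int × Option Int) (id : Option Int) :
    List String × Option Int × Option Int :=
  let (ranges, first, last) := st
  if id ≠ last.map (· + 1) then
    let r : String :=
      match first, last with
      | some f, some l =>
          if l = f then PySem.Int.toStr l
          else PySem.Int.toStr f ++ "-" ++ PySem.Int.toStr l
      | _, _ => ""   -- unreachable: first/last are still set whenever a range is emitted
    (ranges ++ [r], id, id)
  else (ranges, first, id)

def format_mask (mask : List Int) : Int × String :=
  let m := PySem.List.sorted (PySem.Set.ofList mask) (fun x => x) false
  let count : Int := m.length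
  match m with
  | [] => (0, "")   -- Python raises IndexError indexing the first id here (excluded by Pre_)
  | m0 :: _ =>
    let res := ((PySem.List.slice m (some 1) none).map some ++ [none]).foldl
        pvStepA ([], some m0, some m0)
    (count, PySem.Str.join "," res.1)

-- ===== PORT B =====
-- format one (first, last) run, as Source B's conditional expression does
def pvFmtB (p : Int × Int) : String :=
  if p.1 = p.2 then PySem.Int.toStr p.1
  else PySem.Int.toStr p.1 ++ "-" ++ PySem.Int.toStr p.2

def format_mask_alt (mask : List Int) : Int × String :=
  let ids := PySem.Set.ofList mask
  let m := PySem.List.sorted ids (fun x => x) false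
  let starts := m.filter (fun x => !(PySem.Set.contains ids (x - 1)))
  let ends := m.filter (fun x => !(PySem.Set.contains ids (x + 1)))
  ((m.length : Int), PySem.Str.join "," ((starts.zip ends).map pvFmtB))

-- ===== PRECONDITION & SPEC =====
-- Pre_ excludes only the empty list, on which A raises IndexError indexing the first id (B returns (0, '') there).
def Pre_format_mask (mask : List Int) : Prop := mask ≠ []
instance (mask : List Int) : Decidable (Pre_format_mask mask) := by unfold Pre_format_mask; infer_instance
def pvWitness_format_mask : List Int := [3, 1, 2, 7]

def Spec_format_mask (mask : List Int) (out : Int × String) : Prop := out = format_mask_alt mask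
instance (mask : List Int) (out : Int × String) : Decidable (Spec_format_mask mask out) := by unfold Spec_format_mask; infer_instance

-- ===== CLAIM (what is proved, stated in full; the proofs are below) =====
def Claim_equal_format_mask : Prop := ∀ (mask : List Int), Dom_format_mask mask → Pre_format_mask mask → Spec_format_mask mask (format_mask mask)

-- ===== LEMMAS AND PROOFS =====

-- reference recursion: the (first, last) runs of a strictly increasing list
def pvStepB (rr : List (Int × Int)) (x : Int) : List (Int × Int) :=
  match rr with
  | (f, l) :: rest => if f = x + 1 then (x, l) :: rest else (x, x) :: (f, l) :: rest
  | [] => [(x, x)]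

def pvRuns : List Int → List (Int × Int)
  | [] => []
  | x :: xs => pvStepB (pvRuns xs) x

-- the boundary filters, with membership tested in the list itself
def pvStarts (m : List Int) : List Int := m.filter (fun x => decide ((x - 1) ∉ m))
def pvEnds (m : List Int) : List Int := m.filter (fun x => decide ((x + 1) ∉ m))

theorem pvStepB_head (rr : List (Int × Int)) (x : Int) :
    ∃ l rest, pvStepB rr x = (x, l) :: rest := by
  cases rr with
  | nil => exact ⟨x, [], rfl⟩
  | cons p rest =>
      obtain ⟨f, l⟩ := p
      by_cases h : f = x + 1
      · exact ⟨l, rest, by simp [pvStepB, h]⟩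
      · exact ⟨x, (f, l) :: rest, by simp [pvStepB, h]⟩

-- key lemma: on a strictly increasing list, zipping starts with ends gives the runs
theorem pvZip_runs (m : List Int) (h : m.Pairwise (· < ·)) :
    (pvStarts m).zip (pvEnds m) = pvRuns m := by
  induction m with
  | nil => rfl
  | cons x xs ih =>
      obtain ⟨hx, hxs⟩ := List.pairwise_cons.mp h
      have ihe := ih hxs
      have hx1 : (x - 1) ∉ x :: xs := by
        intro hm
        rcases List.mem_cons.mp hm with he | hm'
        · omega
        · exact absurd (hx _ hm') (by omega)
      cases xs with
      | nil => simp [pvStarts, pvEnds, pvRuns, pvStepB]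
      | cons y ys =>
          have hy : x < y := hx y List.mem_cons_self
          have hys : ∀ z ∈ ys, y < z := (List.pairwise_cons.mp hxs).1
          have hy1 : (y - 1) ∉ y :: ys := by
            intro hm
            rcases List.mem_cons.mp hm with he | hm'
            · omega
            · exact absurd (hys _ hm') (by omega)
          have h1 : pvStarts (y :: ys) = y :: ys.filter (fun z => decide ((z - 1) ∉ y :: ys)) := by
            unfold pvStarts
            simp only [List.filter_cons, decide_eq_true hy1, if_true]
          obtain ⟨e, rest, hr⟩ := pvStepB_head (pvRuns ys) y
          have hruns : pvRuns (y :: ys) = (y, e) :: rest := by simp [pvRuns, hr]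
          by_cases hyx : y = x + 1
          · have h2 : ∀ z ∈ ys, (decide ((z - 1) ∉ x :: y :: ys)) = (decide ((z - 1) ∉ y :: ys)) := by
              intro z hz
              have hzgt : y < z := hys z hz
              simp only [decide_eq_decide, List.mem_cons]
              constructor
              · intro hn hc; exact hn (Or.inr hc)
              · intro hn hc
                rcases hc with he | hc
                · omega
                · exact hn hc
            have hymem : (y - 1) ∈ x :: y :: ys := List.mem_cons.mpr (Or.inl (by omega))
            have hstarts : pvStarts (x :: y :: ys)
                = x :: ys.filter (fun z => decide ((z - 1) ∉ y :: ys)) := by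
              unfold pvStarts
              simp only [List.filter_cons, decide_eq_true hx1,
                decide_eq_false (not_not_intro hymem), if_true, Bool.false_eq_true, if_false]
              rw [List.filter_congr h2]
            have hxmem : (x + 1) ∈ x :: y :: ys :=
              List.mem_cons.mpr (Or.inr (List.mem_cons.mpr (Or.inl (by omega))))
            have h3 : ∀ z ∈ y :: ys, (decide ((z + 1) ∉ x :: y :: ys)) = (decide ((z + 1) ∉ y :: ys)) := by
              intro z hz
              have hzgt : x < z := hx z hz
              simp only [decide_eq_decide, List.mem_cons]
              constructor
              · intro hn hc; exact hn (Or.inr hc)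
              · intro hn hc
                rcases hc with he | hc
                · omega
                · exact hn hc
            have hends : pvEnds (x :: y :: ys) = pvEnds (y :: ys) := by
              unfold pvEnds
              simp only [List.filter_cons]
              rw [h3 y List.mem_cons_self,
                List.filter_congr (fun z hz => h3 z (List.mem_cons_of_mem _ hz)),
                decide_eq_false (not_not_intro hxmem)]
              simp
            have hstep : pvRuns (x :: y :: ys) = (x, e) :: rest := by
              show pvStepB (pvRuns (y :: ys)) x = _
              rw [hruns]
              simp [pvStepB, hyx]
            rw [hstarts, hends, hstep]
            rw [h1, hruns] at ihe
            cases hE : pvEnds (y :: ys) with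
            | nil => rw [hE] at ihe; simp at ihe
            | cons e0 es =>
                rw [hE] at ihe
                simp only [List.zip_cons_cons, List.cons.injEq, Prod.mk.injEq] at ihe
                obtain ⟨⟨he1, he2⟩, he3⟩ := ihe
                rw [List.zip_cons_cons, he2, he3]
          · have hgap : x + 1 < y := by omega
            have hx1' : (x + 1) ∉ x :: y :: ys := by
              intro hm
              rcases List.mem_cons.mp hm with he | hm'
              · omega
              · rcases List.mem_cons.mp hm' with he2 | hm''
                · omega
                · exact absurd (hys _ hm'') (by omega)
            have hcongr1 : ∀ z ∈ y :: ys, (decide ((z - 1) ∉ x :: y :: ys)) = (decide ((z - 1) ∉ y :: ys)) := by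
              intro z hz
              have hzgt : x + 1 < z := by
                rcases List.mem_cons.mp hz with he | hm'
                · omega
                · have := hys _ hm'; omega
              simp only [decide_eq_decide, List.mem_cons]
              constructor
              · intro hn hc; exact hn (Or.inr hc)
              · intro hn hc
                rcases hc with he | hc
                · omega
                · exact hn hc
            have hcongr2 : ∀ z ∈ y :: ys, (decide ((z + 1) ∉ x :: y :: ys)) = (decide ((z + 1) ∉ y :: ys)) := by
              intro z hz
              have hzgt : x < z := hx z hz
              simp only [decide_eq_decide, List.mem_cons]
              constructor
              · intro hn hc; exact hn (Or.inr hc)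
              · intro hn hc
                rcases hc with he | hc
                · omega
                · exact hn hc
            have hstarts : pvStarts (x :: y :: ys) = x :: pvStarts (y :: ys) := by
              unfold pvStarts
              simp only [List.filter_cons]
              rw [hcongr1 y List.mem_cons_self,
                List.filter_congr (fun z hz => hcongr1 z (List.mem_cons_of_mem _ hz)),
                decide_eq_true hx1]
              simp
            have hends : pvEnds (x :: y :: ys) = x :: pvEnds (y :: ys) := by
              unfold pvEnds
              simp only [List.filter_cons]
              rw [hcongr2 y List.mem_cons_self,
                List.filter_congr (fun z hz => hcongr2 z (List.mem_cons_of_mem _ hz)),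
                decide_eq_true hx1']
              simp
            have hstep : pvRuns (x :: y :: ys) = (x, x) :: pvRuns (y :: ys) := by
              show pvStepB (pvRuns (y :: ys)) x = _
              rw [hruns]
              simp only [pvStepB, if_neg (show ¬ y = x + 1 from hyx)]
            rw [hstarts, hends, hstep, List.zip_cons_cons, ihe]

-- the two-parameter run-extension used to describe A's loop state
def pvConsRun (f l : Int) (rr : List (Int × Int)) : List (Int × Int) :=
  match rr with
  | (g, e) :: rest => if g = l + 1 then (f, e) :: rest else (f, l) :: (g, e) :: rest
  | [] => [(f, l)]

theorem pvConsRun_self (x : Int) (rr : List (Int × Int)) : pvConsRun x x rr = pvStepB rr x := by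
  cases rr with
  | nil => rfl
  | cons p rest => obtain ⟨g, e⟩ := p; by_cases h : g = x + 1 <;> simp [pvConsRun, pvStepB, h]

theorem pvConsRun_step (f l x : Int) (rr : List (Int × Int)) (h : x = l + 1) :
    pvConsRun f l (pvStepB rr x) = pvConsRun f x rr := by
  subst h
  cases rr with
  | nil => simp [pvStepB, pvConsRun]
  | cons p rest =>
      obtain ⟨g, e⟩ := p
      by_cases hg : g = l + 1 + 1 <;> simp [pvStepB, pvConsRun, hg]

theorem pvConsRun_nostep (f l x : Int) (rr : List (Int × Int)) (h : ¬ x = l + 1) :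
    pvConsRun f l (pvStepB rr x) = (f, l) :: pvStepB rr x := by
  obtain ⟨l', rest, he⟩ := pvStepB_head rr x
  rw [he]; simp [pvConsRun, h]

-- A's loop, characterised: starting from (rs, some f, some l), consuming xs then the
-- sentinel produces rs ++ the formatted runs of pvConsRun f l (pvRuns xs).
theorem pvFoldA (xs : List Int) : ∀ (rs : List String) (f l : Int),
    ((xs.map some ++ [none]).foldl pvStepA (rs, some f, some l)).1
      = rs ++ (pvConsRun f l (pvRuns xs)).map pvFmtB := by
  induction xs with
  | nil =>
      intro rs f l
      by_cases h : l = f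
      · subst h; simp [pvStepA, pvConsRun, pvRuns, pvFmtB, Option.map]
      · simp [pvStepA, pvConsRun, pvRuns, pvFmtB, h, Ne.symm h, Option.map]
  | cons x xs ih =>
      intro rs f l
      by_cases h : x = l + 1
      · have hs : pvStepA (rs, some f, some l) (some x) = (rs, some f, some x) := by
          simp [pvStepA, h, Option.map]
        simp only [List.map_cons, List.cons_append, List.foldl_cons, hs, ih, pvRuns,
          pvConsRun_step f l x _ h]
      · have hs : pvStepA (rs, some f, some l) (some x)
            = (rs ++ [pvFmtB (f, l)], some x, some x) := by
          by_cases hlf : l = f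
          · subst hlf; simp [pvStepA, h, pvFmtB, Option.map]
          · simp [pvStepA, h, hlf, Ne.symm hlf, pvFmtB, Option.map]
        simp only [List.map_cons, List.cons_append, List.foldl_cons, hs, ih, pvRuns,
          pvConsRun_self, pvConsRun_nostep f l x _ h]
        simp

theorem pvSorted_ne_nil (mask : List Int) (h : mask ≠ []) :
    PySem.List.sorted (PySem.Set.ofList mask) (fun x => x) false ≠ [] := by
  intro he
  rw [PySem.List.sorted_eq_nil_iff] at he
  cases mask with
  | nil => exact h rfl
  | cons a t =>
      have : a ∈ PySem.Set.ofList (a :: t) := by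
        rw [PySem.Set.mem_ofList]; exact List.mem_cons_self
      rw [he] at this; exact (List.not_mem_nil) this

-- B's contains-based filters equal the list-membership filters pvStarts/pvEnds

theorem pvFilters_eq (mask : List Int) :
    (PySem.List.sorted (PySem.Set.ofList mask) (fun x => x) false).filter
        (fun x => !(PySem.Set.contains (PySem.Set.ofList mask) (x - 1)))
      = pvStarts (PySem.List.sorted (PySem.Set.ofList mask) (fun x => x) false)
    ∧ (PySem.List.sorted (PySem.Set.ofList mask) (fun x => x) false).filter
        (fun x => !(PySem.Set.contains (PySem.Set.ofList mask) (x + 1)))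
      = pvEnds (PySem.List.sorted (PySem.Set.ofList mask) (fun x => x) false) := by
  constructor
  · exact List.filter_congr (by intro z _; simp)
  · exact List.filter_congr (by intro z _; simp)

-- ===== VERDICT (by name: the statement is the Claim_ definition above) =====
theorem format_mask_spec : Claim_equal_format_mask := by
  intro mask _ hpre
  unfold Spec_format_mask format_mask format_mask_alt
  dsimp only
  obtain ⟨hS, hE⟩ := pvFilters_eq mask
  have hm := pvSorted_ne_nil mask hpre
  have hsort := PySem.List.sorted_ofList_pairwise_lt (xs := mask)
  cases he : PySem.List.sorted (PySem.Set.ofList mask) (fun x => x) false with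
  | nil => exact absurd he hm
  | cons m0 rest =>
      rw [he] at hS hE hsort
      simp only [PySem.List.slice_from_one, List.tail_cons, hS, hE]
      rw [pvZip_runs _ hsort]
      rw [pvFoldA rest [] m0 m0, pvConsRun_self]
      simp [pvRuns]
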